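-- pv_equiv track=rewrite | github.com/HEKYPTO/S-SERIES | S1/Q2.py | case_permutations
-- ===== SOURCE A (Python) =====
-- import itertools
--
-- def case_permutations(word):
--     substitutions = {
--         'a': '@', 'i': '1!', 'l': '1Ii', 'o': '0', 's': '$5'
--     }
--
--     def char_variations(char):
--         lower = char.lower()
--         if lower in substitutions:
--             return char.lower() + char.upper() + substitutions[lower]
--         return char.lower() + char.upper()
--
--     variations = map(char_variations, word)
--     return (''.join(combo) for combo in itertools.product(*variations))
-- ===== SOURCE B (Python) =====
-- def case_permutations(word):
--     substitutions = {
--         'a': '@', 'i': '1!', 'l': '1Ii', 'o': '0', 's': '$5'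
--     }
--
--     def char_variations(char):
--         lower = char.lower()
--         if lower in substitutions:
--             return char.lower() + char.upper() + substitutions[lower]
--         return char.lower() + char.upper()
--
--     results = ['']
--     for char in reversed(word):
--         results = [v + rest for v in char_variations(char) for rest in results]
--     return (s for s in results)
-- ===== Notes on version B (the rewrite author's own statement) =====
-- stated objective: alternative
-- what changed: Replaces the itertools.product-over-variations pipeline (tuples of chars joined afterwards) with an iterative back-to-front build: a fold over the reversed word that prepends each character's variations to the already-built suffix strings, preserving product's enumeration order.
import Mathlib
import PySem

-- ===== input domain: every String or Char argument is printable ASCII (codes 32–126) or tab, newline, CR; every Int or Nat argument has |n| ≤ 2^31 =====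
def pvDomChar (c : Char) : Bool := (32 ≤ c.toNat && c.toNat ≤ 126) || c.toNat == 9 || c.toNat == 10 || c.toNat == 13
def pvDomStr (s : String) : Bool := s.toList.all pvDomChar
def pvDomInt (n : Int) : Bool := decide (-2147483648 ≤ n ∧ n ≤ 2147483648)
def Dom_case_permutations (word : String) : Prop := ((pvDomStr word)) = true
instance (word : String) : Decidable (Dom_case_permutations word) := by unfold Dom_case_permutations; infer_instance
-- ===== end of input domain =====

-- B replaces the itertools.product pipeline by an iterative back-to-front build over the
-- reversed word, producing the output strings directly in the same enumeration order (alternative decomposition).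

-- ===== PORT A =====
-- the substitutions dict and char_variations helper are identical in A and B; ported once, shared
def pvSubs : PySem.Dict String String :=
  PySem.Dict.ofList [("a", "@"), ("i", "1!"), ("l", "1Ii"), ("o", "0"), ("s", "$5")]

def pvCharVariations (ch : String) : String :=
  let lower := PySem.Str.lower ch
  match pvSubs.get? lower with
  | some v => lower ++ PySem.Str.upper ch ++ v
  | none   => lower ++ PySem.Str.upper ch

-- itertools.product over the variation strings: tuples represented as lists of 1-char strings
def pvProductA : List String → List (List String)
  | [] => [[]]
  | v :: vs => v.toList.flatMap (fun c => (pvProductA vs).map (fun t => String.ofList [c] :: t))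

def case_permutations (word : String) : List String :=
  let variations := word.toList.map (fun c => pvCharVariations (String.ofList [c]))
  (pvProductA variations).map (fun combo => PySem.Str.join "" combo)

-- ===== PORT B =====
-- 'for char in reversed(word): results = [v + rest for v in char_variations(char) for rest in results]'
def case_permutations_alt (word : String) : List String :=
  word.toList.reverse.foldl
    (fun results c =>
      (pvCharVariations (String.ofList [c])).toList.flatMap
        (fun v => results.map (fun rest => String.ofList [v] ++ rest)))
    [""]

-- ===== PRECONDITION & SPEC =====
def Spec_case_permutations (word : String) (out : List String) : Prop := out = case_permutations_alt word
instance (word : String) (out : List String) : Decidable (Spec_case_permutations word out) := by unfold Spec_case_permutations; infer_instance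

-- ===== CLAIM (what is proved, stated in full; the proofs are below) =====
def Claim_equal_case_permutations : Prop := ∀ (word : String), Dom_case_permutations word → Spec_case_permutations word (case_permutations word)

-- ===== LEMMAS AND PROOFS =====

theorem pvJoin_cons (s : String) (ts : List String) :
    PySem.Str.join "" (s :: ts) = s ++ PySem.Str.join "" ts := by
  have h : List.intercalate ([] : List Char) (s.toList :: ts.map String.toList)
      = s.toList ++ List.intercalate [] (ts.map String.toList) := by
    cases ts <;> simp [List.intercalate]
  simp [PySem.Str.join, PySem.Chars.join, h, String.ofList_append]

-- B's loop body as a function, for stating the invariant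
def pvStepB (results : List String) (c : Char) : List String :=
  (pvCharVariations (String.ofList [c])).toList.flatMap
    (fun v => results.map (fun rest => String.ofList [v] ++ rest))

theorem pvMain (cs : List Char) :
    (pvProductA (cs.map (fun c => pvCharVariations (String.ofList [c])))).map
        (fun combo => PySem.Str.join "" combo) = cs.reverse.foldl pvStepB [""] := by
  induction cs with
  | nil => simp [pvProductA, PySem.Str.join, PySem.Chars.join, List.intercalate]
  | cons c rest ih =>
      rw [List.reverse_cons, List.foldl_append]
      simp only [List.map_cons, pvProductA, List.map_flatMap, List.map_map, List.foldl_cons,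
        List.foldl_nil, ← ih, pvStepB]
      refine List.flatMap_congr ?_
      intro ch _
      simp [Function.comp, pvJoin_cons]

-- ===== VERDICT (by name: the statement is the Claim_ definition above) =====
theorem case_permutations_spec : Claim_equal_case_permutations := by
  intro word _
  unfold Spec_case_permutations case_permutations case_permutations_alt
  exact pvMain word.toList
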